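-- pv_equiv track=rewrite | github.com/sbarczyk/WDI | Kolokwia/poprawkowe/Kolokwia_inne/22_23/zad_5A.py | down_col_rotate
-- ===== SOURCE A (Python) =====
-- def down_col_rotate(T, col):
--     n = len(T)
--     new_matrix = [row[:] for row in T]
--
--     tmp = new_matrix[n-1][col]
--
--     for i in range(n-1, 0, -1):
--         new_matrix[i][col] = new_matrix[i-1][col]
--     new_matrix[0][col] = tmp
--     return new_matrix
-- ===== SOURCE B (Python) =====
-- def down_col_rotate(T, col):
--     new = [row[:] for row in T]
--     col_vals = [row[col] for row in T]
--     rotated = [col_vals[-1]] + col_vals[:-1]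
--     for i, v in enumerate(rotated):
--         new[i][col] = v
--     return new
-- ===== Notes on version B (the rewrite author's own statement) =====
-- stated objective: alternative
-- what changed: B extracts the target column as a list, rotates it once with slicing ([last] + rest), and scatters it back in a forward enumerate pass, instead of A's backward in-place element-by-element shift with a saved tmp.
import Mathlib
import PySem

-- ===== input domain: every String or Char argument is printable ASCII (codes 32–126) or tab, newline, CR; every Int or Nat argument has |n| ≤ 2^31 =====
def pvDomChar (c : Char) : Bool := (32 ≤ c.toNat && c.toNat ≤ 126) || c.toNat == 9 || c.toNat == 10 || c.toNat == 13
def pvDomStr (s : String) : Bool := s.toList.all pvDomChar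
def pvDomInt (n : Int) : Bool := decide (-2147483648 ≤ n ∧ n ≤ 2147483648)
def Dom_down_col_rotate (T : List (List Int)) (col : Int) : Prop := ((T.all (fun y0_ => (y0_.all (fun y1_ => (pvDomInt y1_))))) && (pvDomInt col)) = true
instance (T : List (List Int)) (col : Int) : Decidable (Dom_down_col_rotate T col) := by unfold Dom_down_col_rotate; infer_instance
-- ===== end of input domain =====

-- B rotates the chosen column of a row-copied matrix by extract / slice-rotate / scatter,
-- instead of A's backward in-place shift; same cost, different traversal shape.
-- A mutates nothing observable (it copies the rows first); equivalence is about the return value.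

-- ===== PORT A =====
-- loop body of A's 'for i in range(n-1, 0, -1): new_matrix[i][col] = new_matrix[i-1][col]'
def fA (col : Int) (m : List (List Int)) (i : Int) : List (List Int) :=
  PySem.List.pySetD m i
    (PySem.List.pySetD (PySem.List.pyGetD m i []) col
      (PySem.List.pyGetD (PySem.List.pyGetD m (i - 1) []) col 0))

def down_col_rotate (T : List (List Int)) (col : Int) : List (List Int) :=
  let n : Int := T.length
  let new_matrix := T.map (fun row => PySem.List.slice row none none)
  let tmp := PySem.List.pyGetD (PySem.List.pyGetD new_matrix (n - 1) []) col 0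
  let new_matrix := (PySem.List.pyRange (n - 1) 0 (-1)).foldl (fA col) new_matrix
  PySem.List.pySetD new_matrix 0
    (PySem.List.pySetD (PySem.List.pyGetD new_matrix 0 []) col tmp)

-- ===== PORT B =====
-- loop body of B's 'for i, v in enumerate(rotated): new[i][col] = v'
def gB (col : Int) (m : List (List Int)) (p : Int × Int) : List (List Int) :=
  PySem.List.pySetD m p.1
    (PySem.List.pySetD (PySem.List.pyGetD m p.1 []) col p.2)

def down_col_rotate_alt (T : List (List Int)) (col : Int) : List (List Int) :=
  let new := T.map (fun row => PySem.List.slice row none none)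
  let colVals := T.map (fun row => PySem.List.pyGetD row col 0)
  let rotated := PySem.List.pyGetD colVals (-1) 0 :: PySem.List.slice colVals none (some (-1))
  (PySem.List.enumerate rotated 0).foldl (gB col) new

-- ===== PRECONDITION & SPEC =====
-- Pre_ excludes exactly the inputs where the Python raises IndexError:
-- empty T (both read the last column value of an empty list) and a col that is
-- out of range for some row (both index every row at col).
def Pre_down_col_rotate (T : List (List Int)) (col : Int) : Prop :=
  T ≠ [] ∧ ∀ row ∈ T, PySem.Raise.InRange row.length col
instance (T : List (List Int)) (col : Int) : Decidable (Pre_down_col_rotate T col) := by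
  unfold Pre_down_col_rotate; infer_instance

def pvWitness_down_col_rotate : List (List Int) × Int := ([[1, 2], [3, 4], [5, 6]], 1)

def Spec_down_col_rotate (T : List (List Int)) (col : Int) (out : List (List Int)) : Prop := out = down_col_rotate_alt T col
instance (T : List (List Int)) (col : Int) (out : List (List Int)) : Decidable (Spec_down_col_rotate T col out) := by unfold Spec_down_col_rotate; infer_instance

-- ===== CLAIM (what is proved, stated in full; the proofs are below) =====
def Claim_equal_down_col_rotate : Prop := ∀ (T : List (List Int)) (col : Int), Dom_down_col_rotate T col → Pre_down_col_rotate T col → Spec_down_col_rotate T col (down_col_rotate T col)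

-- ===== LEMMAS AND PROOFS =====

theorem length_foldl_fA (col : Int) (l : List Int) (m : List (List Int)) :
    (l.foldl (fA col) m).length = m.length := by
  induction l generalizing m with
  | nil => rfl
  | cons x xs ih => simp [List.foldl_cons, ih, fA, PySem.List.length_pySetD]

theorem A_loop_get (col : Int) (k : Nat) (m : List (List Int)) (hk : k < m.length) (j : Nat) :
    ((PySem.List.pyRange (k : Int) 0 (-1)).foldl (fA col) m)[j]? =
      if 1 ≤ j ∧ j ≤ k then
        some (PySem.List.pySetD (m.getD j []) col (PySem.List.pyGetD (m.getD (j - 1) []) col 0))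
      else m[j]? := by
  induction k generalizing m with
  | zero =>
    rw [PySem.List.pyRange_neg_one_eq_nil (by norm_num)]
    simp only [List.foldl_nil]
    rw [if_neg (by omega)]
  | succ k ih =>
    rw [show ((k + 1 : Nat) : Int) = ((k : Int) + 1) by push_cast; ring,
        PySem.List.pyRange_neg_one_cons (by positivity)]
    simp only [List.foldl_cons, add_sub_cancel_right]
    set w : List Int :=
      PySem.List.pySetD (m.getD (k + 1) []) col
        (PySem.List.pyGetD (m.getD k []) col 0) with hw
    have hset : fA col m ((k : Int) + 1) = m.set (k + 1) w := by
      simp only [fA]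
      rw [show ((k : Int) + 1) = ((k + 1 : Nat) : Int) by push_cast; ring]
      rw [show ((k + 1 : Nat) : Int) - 1 = ((k : Nat) : Int) by push_cast; ring]
      simp only [PySem.List.pySetD_natCast, PySem.List.pyGetD_natCast]
      rw [hw]
    rw [hset, ih (m.set (k + 1) w) (by simp only [List.length_set]; omega)]
    by_cases h1 : 1 ≤ j ∧ j ≤ k
    · rw [if_pos h1, if_pos (show 1 ≤ j ∧ j ≤ k + 1 by omega)]
      have e1 : (m.set (k + 1) w).getD j [] = m.getD j [] := by
        rw [List.getD_eq_getElem?_getD, List.getD_eq_getElem?_getD,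
            List.getElem?_set_ne (by omega)]
      have e2 : (m.set (k + 1) w).getD (j - 1) [] = m.getD (j - 1) [] := by
        rw [List.getD_eq_getElem?_getD, List.getD_eq_getElem?_getD,
            List.getElem?_set_ne (by omega)]
      rw [e1, e2]
    · by_cases h2 : j = k + 1
      · subst h2
        rw [if_neg h1, if_pos (show 1 ≤ k + 1 ∧ k + 1 ≤ k + 1 by omega),
            List.getElem?_set_self (by omega), Nat.add_sub_cancel, hw]
      · rw [if_neg h1, if_neg (by omega), List.getElem?_set_ne (by omega)]

theorem B_loop_get (col : Int) (l : List Int) (s : Nat) (m : List (List Int))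
    (hl : s + l.length ≤ m.length) (j : Nat) :
    ((PySem.List.enumerate l (s : Int)).foldl (gB col) m)[j]? =
      if s ≤ j ∧ j < s + l.length then
        some (PySem.List.pySetD (m.getD j []) col (l.getD (j - s) 0))
      else m[j]? := by
  induction l generalizing s m with
  | nil =>
    simp only [PySem.List.enumerate_nil, List.foldl_nil, List.length_nil]
    rw [if_neg (by omega)]
  | cons x xs ih =>
    rw [PySem.List.enumerate_cons]
    simp only [List.foldl_cons]
    set w : List Int := PySem.List.pySetD (m.getD s []) col x with hw
    have hset : gB col m ((s : Int), x) = m.set s w := by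
      simp only [gB, PySem.List.pySetD_natCast, PySem.List.pyGetD_natCast]
      rw [hw]
    have hl' : s + 1 + xs.length ≤ m.length := by simp at hl; omega
    rw [hset, show ((s : Int) + 1) = ((s + 1 : Nat) : Int) by push_cast; ring,
        ih (s + 1) (m.set s w) (by simp only [List.length_set]; omega)]
    by_cases h1 : s + 1 ≤ j ∧ j < s + 1 + xs.length
    · rw [if_pos h1, if_pos (show s ≤ j ∧ j < s + (x :: xs).length by simp; omega)]
      have e1 : (m.set s w).getD j [] = m.getD j [] := by
        rw [List.getD_eq_getElem?_getD, List.getD_eq_getElem?_getD,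
            List.getElem?_set_ne (by omega)]
      have e2 : xs.getD (j - (s + 1)) 0 = (x :: xs).getD (j - s) 0 := by
        rw [show j - s = (j - (s + 1)) + 1 by omega, List.getD_cons_succ]
      rw [e1, ← e2]
    · by_cases h2 : j = s
      · rw [if_neg h1, if_pos (show s ≤ j ∧ j < s + (x :: xs).length by
              simp only [List.length_cons]; omega), h2,
            List.getElem?_set_self (by omega), Nat.sub_self, List.getD_cons_zero, hw]
      · rw [if_neg h1, if_neg (by simp; omega), List.getElem?_set_ne (by omega)]

-- ===== VERDICT (by name: the statement is the Claim_ definition above) =====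
theorem down_col_rotate_spec : Claim_equal_down_col_rotate := by
  intro T col _ hpre
  obtain ⟨hne, -⟩ := hpre
  unfold Spec_down_col_rotate down_col_rotate down_col_rotate_alt
  simp only [PySem.List.slice_none_none, List.map_id']
  set n : Nat := T.length with hn
  have hn1 : 1 ≤ n := by rw [hn]; exact List.length_pos_of_ne_nil hne
  have hcast : (n : Int) - 1 = ((n - 1 : Nat) : Int) := by
    rw [Nat.cast_sub hn1, Nat.cast_one]
  set colVals : List Int := T.map (fun row => PySem.List.pyGetD row col 0) with hcv
  have hcvlen : colVals.length = n := by rw [hcv, List.length_map]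
  have hcvne : colVals ≠ [] := by
    intro h; rw [h] at hcvlen; simp at hcvlen; omega
  set rotated : List Int :=
    PySem.List.pyGetD colVals (-1) 0 :: PySem.List.slice colVals none (some (-1)) with hrot
  have hrlen : rotated.length = n := by
    rw [hrot]
    simp only [List.length_cons, PySem.List.slice_to_neg_one, List.length_dropLast, hcvlen]
    omega
  have hrget : ∀ j : Nat, j < n → rotated.getD j 0 =
      PySem.List.pyGetD (T.getD (if j = 0 then n - 1 else j - 1) []) col 0 := by
    intro j hj
    cases j with
    | zero =>
      rw [hrot, List.getD_cons_zero, if_pos rfl,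
          PySem.List.pyGetD_neg_one colVals 0 hcvne,
          List.getLast_eq_getElem, List.getD_eq_getElem _ _ (by omega)]
      simp only [hcv, List.getElem_map, List.length_map]
      simp only [show T.length = n from hn.symm]
    | succ i =>
      rw [hrot, List.getD_cons_succ, if_neg (Nat.succ_ne_zero i), Nat.add_sub_cancel,
          PySem.List.slice_to_neg_one,
          List.getD_eq_getElem _ _ (by rw [List.length_dropLast, hcvlen]; omega),
          List.getElem_dropLast,
          List.getD_eq_getElem _ _ (by omega)]
      simp only [hcv, List.getElem_map]
  rw [hcast]
  set L : List (List Int) :=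
    (PySem.List.pyRange ((n - 1 : Nat) : Int) 0 (-1)).foldl (fA col) T with hLdef
  have hLget : ∀ j : Nat, L[j]? =
      if 1 ≤ j ∧ j ≤ n - 1 then
        some (PySem.List.pySetD (T.getD j []) col (PySem.List.pyGetD (T.getD (j - 1) []) col 0))
      else T[j]? := by
    intro j; rw [hLdef]; exact A_loop_get col (n - 1) T (by omega) j
  have hLlen : L.length = n := by rw [hLdef, length_foldl_fA]
  apply List.ext_getElem?
  intro j
  rw [PySem.List.pySetD_of_nonneg L _ (le_refl 0), Int.toNat_zero]
  have hB := B_loop_get col rotated 0 T (by omega) j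
  rw [Nat.cast_zero] at hB
  rw [hB]
  simp only [Nat.zero_add, Nat.zero_le, true_and, Nat.sub_zero, hrlen]
  by_cases hj : j < n
  · rw [if_pos hj, hrget j hj]
    by_cases hj0 : j = 0
    · subst hj0
      rw [List.getElem?_set_self (by omega), if_pos rfl,
          PySem.List.pyGetD_zero, PySem.List.pyGetD_natCast]
      have e0 : L.getD 0 [] = T.getD 0 [] := by
        rw [List.getD_eq_getElem?_getD, hLget 0, if_neg (by omega),
            ← List.getD_eq_getElem?_getD]
      rw [e0]
    · rw [List.getElem?_set_ne (by omega), hLget j, if_pos (by omega), if_neg hj0]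
  · rw [if_neg hj, List.getElem?_set_ne (by omega), hLget j, if_neg (by omega)]
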